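-- pv_equiv track=rewrite | github.com/senjieyu/all_useful_code | 复杂孪晶+正交晶胞转化/single_twin_2.0_可选择输出正交超胞.py | make_fcc111_twin_stacking_single_plane
-- ===== SOURCE A (Python) =====
-- def make_fcc111_twin_stacking_single_plane(d1: int, d2: int, d3: int, start: str = "A"):
--     """
--     bottom matrix (d3) | twin (d2) | top matrix (d1)
--     CTB is a single atomic layer (shared plane), no duplicated layer.
--     Total layers = d1 + d2 + d3 - 2
--     """
--     for name, d in [("d1", d1), ("d2", d2), ("d3", d3)]:
--         if not isinstance(d, int) or d <= 0:
--             raise ValueError(f"{name} must be a positive integer (layer count).")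
--     if d2 < 2:
--         raise ValueError("d2 must be >= 2 (twin lamella must span two CTBs).")
--
--     start = start.upper()
--     if start not in "ABC":
--         raise ValueError("start must be 'A'/'B'/'C'.")
--
--     fwd = {"A": "B", "B": "C", "C": "A"}  # matrix
--     bwd = {"A": "C", "C": "B", "B": "A"}  # twin (reversed)
--
--     def grow(n, next_map, first_letter):
--         out = [first_letter]
--         cur = first_letter
--         for _ in range(n - 1):
--             cur = next_map[cur]
--             out.append(cur)
--         return out
--
--     seq = []
--
--     bottom = grow(d3, fwd, start)
--     seq += bottom
--
--     # twin: first layer shared with last of bottom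
--     twin_first = seq[-1]
--     twin = grow(d2, bwd, twin_first)
--     seq += twin[1:]
--
--     # top matrix: first layer shared with last of twin
--     top_first = seq[-1]
--     top = grow(d1, fwd, top_first)
--     seq += top[1:]
--
--     return "".join(seq)
-- ===== SOURCE B (Python) =====
-- def make_fcc111_twin_stacking_single_plane(d1: int, d2: int, d3: int, start: str = "A"):
--     """
--     bottom matrix (d3) | twin (d2) | top matrix (d1), CTBs shared.
--     Closed-form: each layer index i maps directly to a letter, no grown lists.
--     """
--     for name, d in [("d1", d1), ("d2", d2), ("d3", d3)]:
--         if not isinstance(d, int) or d <= 0: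
--             raise ValueError(f"{name} must be a positive integer (layer count).")
--     if d2 < 2:
--         raise ValueError("d2 must be >= 2 (twin lamella must span two CTBs).")
--
--     i0 = {"A": 0, "B": 1, "C": 2}[start.upper()]
--
--     total = d1 + d2 + d3 - 2
--     p2 = d3 + d2 - 2  # position of the second CTB (last twin layer / first top layer)
--
--     def letter(i):
--         if i < d3:
--             k = i0 + i                      # bottom matrix: forward
--         elif i <= p2:
--             k = i0 + 2 * (d3 - 1) - i      # twin lamella: reversed
--         else:
--             k = i0 + i - 2 * (d2 - 1)      # top matrix: forward again
--         return "ABC"[k % 3]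
--
--     return "".join(letter(i) for i in range(total))
-- ===== Notes on version B (the rewrite author's own statement) =====
-- stated objective: alternative
-- what changed: Replaces the three grow-lists (stateful successor-dict walks plus [1:] trimming and seq[-1] lookups) with a single closed-form per-position formula: layer i's letter is 'ABC'[k%3] with k computed arithmetically from i and the segment boundaries, joined in one pass.
import Mathlib
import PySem

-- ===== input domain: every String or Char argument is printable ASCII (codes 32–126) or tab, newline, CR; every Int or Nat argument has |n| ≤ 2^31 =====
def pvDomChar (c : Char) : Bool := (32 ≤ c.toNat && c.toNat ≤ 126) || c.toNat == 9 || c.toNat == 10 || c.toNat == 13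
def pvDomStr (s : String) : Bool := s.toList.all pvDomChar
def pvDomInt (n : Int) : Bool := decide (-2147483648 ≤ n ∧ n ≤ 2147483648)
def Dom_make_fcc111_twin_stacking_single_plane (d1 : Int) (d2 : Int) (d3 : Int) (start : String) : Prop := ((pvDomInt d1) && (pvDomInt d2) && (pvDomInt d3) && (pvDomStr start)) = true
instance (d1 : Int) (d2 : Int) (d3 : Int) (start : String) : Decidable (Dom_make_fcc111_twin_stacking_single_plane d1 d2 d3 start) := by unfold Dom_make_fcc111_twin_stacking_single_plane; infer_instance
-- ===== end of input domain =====

-- B replaces A's three stateful successor-dict walks (grow lists, [1:] trims, seq[-1] lookups)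
-- by a single closed-form letter(i) formula mapped over one range; neither version mutates
-- its arguments.

-- ===== PORT A =====
-- grow(n, next_map, first_letter): out = [first]; cur = first; n-1 times: cur = map[cur]; append
-- (next_map[cur] can only raise KeyError outside Pre_, so getD's "" default is unreachable there)
def pvGrow (n : Int) (m : PySem.Dict String String) (first : String) : List String :=
  ((PySem.List.pyRange 0 (n - 1) 1).foldl
    (fun (st : List String × String) _ =>
      (st.1 ++ [m.getD st.2 ""], m.getD st.2 ""))
    ([first], first)).1

def make_fcc111_twin_stacking_single_plane (d1 : Int) (d2 : Int) (d3 : Int) (start : String) : String :=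
  -- the validation `raise ValueError` branches are exactly the inputs excluded by Pre_
  let start := PySem.Str.upper start
  let fwd := PySem.Dict.ofList [("A", "B"), ("B", "C"), ("C", "A")]
  let bwd := PySem.Dict.ofList [("A", "C"), ("C", "B"), ("B", "A")]
  let bottom := pvGrow d3 fwd start
  let seq := bottom
  let twin_first := PySem.List.pyGetD seq (-1) ""   -- seq[-1], in range under Pre_
  let twin := pvGrow d2 bwd twin_first
  let seq := seq ++ PySem.List.slice twin (some 1) none
  let top_first := PySem.List.pyGetD seq (-1) ""
  let top := pvGrow d1 fwd top_first
  let seq := seq ++ PySem.List.slice top (some 1) none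
  PySem.Str.join "" seq

-- ===== PORT B =====
-- letter(i): piecewise index arithmetic, then "ABC"[k % 3] (a 1-char string in Python)
def pvLetter (d2 : Int) (d3 : Int) (p2 : Int) (i0 : Int) (i : Int) : String :=
  let k := if i < d3 then i0 + i
           else if i ≤ p2 then i0 + 2 * (d3 - 1) - i
           else i0 + i - 2 * (d2 - 1)
  ((PySem.Str.pyGet? "ABC" (PySem.Int.mod k 3)).map (fun c => String.ofList [c])).getD ""

def make_fcc111_twin_stacking_single_plane_alt (d1 : Int) (d2 : Int) (d3 : Int) (start : String) : String :=
  -- the validation `raise` branches and the start-dict KeyError are exactly the inputs excluded by Pre_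
  let i0 := (PySem.Dict.ofList [("A", (0 : Int)), ("B", 1), ("C", 2)]).getD (PySem.Str.upper start) 0
  let total := d1 + d2 + d3 - 2
  let p2 := d3 + d2 - 2
  PySem.Str.join "" ((PySem.List.pyRange 0 total 1).map (fun i => pvLetter d2 d3 p2 i0 i))

-- ===== PRECONDITION & SPEC =====
-- Pre_ = exactly the inputs where A returns: positive layer counts, d2 ≥ 2, and start
-- upper-casing to a single letter A/B/C (on all other inputs A raises ValueError or KeyError).
def Pre_make_fcc111_twin_stacking_single_plane (d1 : Int) (d2 : Int) (d3 : Int) (start : String) : Prop :=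
  1 ≤ d1 ∧ 2 ≤ d2 ∧ 1 ≤ d3 ∧
  (PySem.Str.upper start = "A" ∨ PySem.Str.upper start = "B" ∨ PySem.Str.upper start = "C")
instance (d1 : Int) (d2 : Int) (d3 : Int) (start : String) : Decidable (Pre_make_fcc111_twin_stacking_single_plane d1 d2 d3 start) := by unfold Pre_make_fcc111_twin_stacking_single_plane; infer_instance

def pvWitness_make_fcc111_twin_stacking_single_plane : Int × Int × Int × String := (2, 3, 2, "b")

def Spec_make_fcc111_twin_stacking_single_plane (d1 : Int) (d2 : Int) (d3 : Int) (start : String) (out : String) : Prop := out = make_fcc111_twin_stacking_single_plane_alt d1 d2 d3 start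
instance (d1 : Int) (d2 : Int) (d3 : Int) (start : String) (out : String) : Decidable (Spec_make_fcc111_twin_stacking_single_plane d1 d2 d3 start out) := by unfold Spec_make_fcc111_twin_stacking_single_plane; infer_instance

-- ===== CLAIM (what is proved, stated in full; the proofs are below) =====
def Claim_equal_make_fcc111_twin_stacking_single_plane : Prop := ∀ (d1 : Int) (d2 : Int) (d3 : Int) (start : String), Dom_make_fcc111_twin_stacking_single_plane d1 d2 d3 start → Pre_make_fcc111_twin_stacking_single_plane d1 d2 d3 start → Spec_make_fcc111_twin_stacking_single_plane d1 d2 d3 start (make_fcc111_twin_stacking_single_plane d1 d2 d3 start)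

-- ===== LEMMAS AND PROOFS =====

-- reference letter at absolute ABC-position k
def pvL (k : Int) : String := if k % 3 = 0 then "A" else if k % 3 = 1 then "B" else "C"

theorem pvFwd_step (j : Int) :
    (PySem.Dict.ofList [("A", "B"), ("B", "C"), ("C", "A")]).getD (pvL j) "" = pvL (j + 1) := by
  have h : j % 3 = 0 ∨ j % 3 = 1 ∨ j % 3 = 2 := by omega
  rcases h with h | h | h <;>
    simp [pvL, h, show (j+1) % 3 = (j % 3 + 1) % 3 by omega] <;> decide

theorem pvBwd_step (j : Int) :
    (PySem.Dict.ofList [("A", "C"), ("C", "B"), ("B", "A")]).getD (pvL j) "" = pvL (j + (-1)) := by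
  have h : j % 3 = 0 ∨ j % 3 = 1 ∨ j % 3 = 2 := by omega
  rcases h with h | h | h <;>
    simp [pvL, h, show (j + (-1)) % 3 = (j % 3 + 2) % 3 by omega] <;> decide

theorem pvLetter_eq (d2 d3 p2 i0 i : Int) :
    pvLetter d2 d3 p2 i0 i =
      pvL (if i < d3 then i0 + i else if i ≤ p2 then i0 + 2 * (d3 - 1) - i
           else i0 + i - 2 * (d2 - 1)) := by
  unfold pvLetter
  set k := if i < d3 then i0 + i else if i ≤ p2 then i0 + 2 * (d3 - 1) - i
           else i0 + i - 2 * (d2 - 1) with hk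
  have h : k % 3 = 0 ∨ k % 3 = 1 ∨ k % 3 = 2 := by omega
  rcases h with h | h | h <;> simp [pvL, h]

theorem pvGrow_fold (m : PySem.Dict String String) (δ : Int)
    (hm : ∀ j : Int, m.getD (pvL j) "" = pvL (j + δ)) :
    ∀ (l : List Int) (acc : List String) (k : Int),
      l.foldl (fun (st : List String × String) _ =>
          (st.1 ++ [m.getD st.2 ""], m.getD st.2 "")) (acc, pvL k)
      = (acc ++ (List.range l.length).map (fun (j : Nat) => pvL (k + δ * ((j : Int) + 1))),
         pvL (k + δ * l.length)) := by
  intro l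
  induction l with
  | nil => intro acc k; simp
  | cons x xs ih =>
    intro acc k
    simp only [List.foldl_cons, hm k]
    rw [ih (acc ++ [pvL (k + δ)]) (k + δ)]
    refine Prod.ext ?_ ?_
    · show acc ++ [pvL (k + δ)] ++ (List.range xs.length).map (fun (j : Nat) => pvL (k + δ + δ * ((j:Int) + 1)))
        = acc ++ (List.range (x :: xs).length).map (fun (j : Nat) => pvL (k + δ * ((j:Int) + 1)))
      rw [List.length_cons, List.range_succ_eq_map, List.append_assoc, List.map_cons, List.map_map,
        List.singleton_append]
      refine congrArg (fun t => acc ++ t) (congrArg₂ List.cons ?_ ?_)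
      · congr 1; push_cast; ring
      · apply List.map_congr_left
        intro a _
        simp only [Function.comp]
        congr 1
        push_cast
        ring
    · show pvL (k + δ + δ * xs.length) = pvL (k + δ * ((x :: xs).length))
      congr 1
      rw [List.length_cons]
      push_cast
      ring

theorem pvGrow_eq (m : PySem.Dict String String) (δ : Int)
    (hm : ∀ j : Int, m.getD (pvL j) "" = pvL (j + δ))
    (n : Int) (hn : 1 ≤ n) (k : Int) :
    pvGrow n m (pvL k) = (List.range n.toNat).map (fun (j : Nat) => pvL (k + δ * (j : Int))) := by
  unfold pvGrow
  rw [pvGrow_fold m δ hm]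
  have hlen : (PySem.List.pyRange 0 (n-1) 1).length = (n-1).toNat := by
    simp [PySem.List.length_pyRange_one]
  have hnt : n.toNat = (n-1).toNat + 1 := by omega
  rw [hlen, hnt, List.range_succ_eq_map, List.map_cons, List.map_map, List.singleton_append]
  refine congrArg₂ List.cons ?_ ?_
  · congr 1; push_cast; ring
  · apply List.map_congr_left
    intro a _
    simp only [Function.comp]
    rfl

theorem pvKey (m1 m2 m3 : Nat) (i0 : Int) (start : String)
    (hs : PySem.Str.upper start = pvL i0)
    (hd : (PySem.Dict.ofList [("A", (0 : Int)), ("B", 1), ("C", 2)]).getD (pvL i0) 0 = i0) :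
    make_fcc111_twin_stacking_single_plane (↑(m1+1)) (↑(m2+2)) (↑(m3+1)) start
      = make_fcc111_twin_stacking_single_plane_alt (↑(m1+1)) (↑(m2+2)) (↑(m3+1)) start := by
  unfold make_fcc111_twin_stacking_single_plane make_fcc111_twin_stacking_single_plane_alt
  simp only [hs, hd]
  -- bottom
  have hbot : pvGrow (↑(m3+1)) (PySem.Dict.ofList [("A", "B"), ("B", "C"), ("C", "A")]) (pvL i0)
      = (List.range (m3+1)).map (fun (j : Nat) => pvL (i0 + 1 * (j : Int))) := by
    rw [pvGrow_eq _ 1 pvFwd_step _ (by exact_mod_cast Nat.le_add_left 1 m3) i0, Int.toNat_natCast]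
  -- twin_first = seq[-1]
  have h1 : PySem.List.pyGetD ((List.range (m3+1)).map (fun (j : Nat) => pvL (i0 + 1 * (j : Int)))) (-1) ""
      = pvL (i0 + 1 * (m3 : Int)) := by
    rw [List.range_succ, List.map_append]
    exact PySem.List.pyGetD_neg_one_append_singleton _ _ _
  -- twin
  have htwin : pvGrow (↑(m2+2)) (PySem.Dict.ofList [("A", "C"), ("C", "B"), ("B", "A")]) (pvL (i0 + 1 * (m3 : Int)))
      = (List.range (m2+2)).map (fun (j : Nat) => pvL (i0 + 1 * (m3 : Int) + (-1) * (j : Int))) := by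
    rw [pvGrow_eq _ (-1) pvBwd_step _ (by exact_mod_cast Nat.le_add_left 1 (m2+1)) _, Int.toNat_natCast]
  have htail : ((List.range (m2+2)).map (fun (j : Nat) => pvL (i0 + 1 * (m3 : Int) + (-1) * (j : Int)))).tail
      = (List.range (m2+1)).map ((fun (j : Nat) => pvL (i0 + 1 * (m3 : Int) + (-1) * (j : Int))) ∘ Nat.succ) := by
    rw [show m2 + 2 = (m2 + 1) + 1 from rfl, List.range_succ_eq_map, List.map_cons, List.tail_cons, List.map_map]
  -- top_first = seq[-1] after the twin was appended
  have h2 : PySem.List.pyGetD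
      ((List.range (m3+1)).map (fun (j : Nat) => pvL (i0 + 1 * (j : Int)))
        ++ (List.range (m2+1)).map ((fun (j : Nat) => pvL (i0 + 1 * (m3 : Int) + (-1) * (j : Int))) ∘ Nat.succ)) (-1) ""
      = pvL (i0 + 1 * (m3 : Int) + (-1) * ((m2 : Int) + 1)) := by
    rw [List.range_succ (n := m2), List.map_append, List.map_singleton, ← List.append_assoc,
      PySem.List.pyGetD_neg_one_append_singleton]
    simp [Function.comp_apply]
  -- top
  have htop : pvGrow (↑(m1+1)) (PySem.Dict.ofList [("A", "B"), ("B", "C"), ("C", "A")]) (pvL (i0 + 1 * (m3 : Int) + (-1) * ((m2 : Int) + 1)))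
      = (List.range (m1+1)).map (fun (j : Nat) => pvL (i0 + 1 * (m3 : Int) + (-1) * ((m2 : Int) + 1) + 1 * (j : Int))) := by
    rw [pvGrow_eq _ 1 pvFwd_step _ (by exact_mod_cast Nat.le_add_left 1 m1) _, Int.toNat_natCast]
  have htopTail : ((List.range (m1+1)).map (fun (j : Nat) => pvL (i0 + 1 * (m3 : Int) + (-1) * ((m2 : Int) + 1) + 1 * (j : Int)))).tail
      = (List.range m1).map ((fun (j : Nat) => pvL (i0 + 1 * (m3 : Int) + (-1) * ((m2 : Int) + 1) + 1 * (j : Int))) ∘ Nat.succ) := by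
    rw [List.range_succ_eq_map, List.map_cons, List.tail_cons, List.map_map]
  rw [hbot, h1, htwin, PySem.List.slice_from_one, htail, h2, htop, PySem.List.slice_from_one, htopTail]
  -- B side: one range, split into the three segments
  have htot : ((m1+1 : Nat) : Int) + ((m2+2 : Nat) : Int) + ((m3+1 : Nat) : Int) - 2
      = (((m3+1) + ((m2+1) + m1) : Nat) : Int) := by push_cast; ring
  conv_rhs => rw [htot, PySem.List.pyRange_zero_nat, List.map_map,
    List.range_add (n := m3+1) (m := (m2+1)+m1), List.map_append, List.map_map,
    List.range_add (n := m2+1) (m := m1), List.map_append, List.map_map]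
  refine congrArg (PySem.Str.join "") ?_
  rw [List.append_assoc]
  refine congrArg₂ (· ++ ·) ?_ (congrArg₂ (· ++ ·) ?_ ?_) <;>
  · apply List.map_congr_left
    intro a ha
    have ha' := List.mem_range.mp ha
    simp only [Function.comp_apply, pvLetter_eq]
    split_ifs with hb1 hb2 <;> (congr 1; push_cast at *; omega)

-- ===== VERDICT (by name: the statement is the Claim_ definition above) =====
theorem make_fcc111_twin_stacking_single_plane_spec : Claim_equal_make_fcc111_twin_stacking_single_plane := by
  intro d1 d2 d3 start _ hpre
  obtain ⟨h1, h2, h3, hs⟩ := hpre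
  unfold Spec_make_fcc111_twin_stacking_single_plane
  obtain ⟨m1, rfl⟩ : ∃ m : Nat, d1 = ((m+1 : Nat) : Int) := ⟨(d1-1).toNat, by omega⟩
  obtain ⟨m2, rfl⟩ : ∃ m : Nat, d2 = ((m+2 : Nat) : Int) := ⟨(d2-2).toNat, by omega⟩
  obtain ⟨m3, rfl⟩ : ∃ m : Nat, d3 = ((m+1 : Nat) : Int) := ⟨(d3-1).toNat, by omega⟩
  rcases hs with h | h | h
  · exact pvKey m1 m2 m3 0 start (by rw [h]; rfl) (by decide)
  · exact pvKey m1 m2 m3 1 start (by rw [h]; rfl) (by decide)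
  · exact pvKey m1 m2 m3 2 start (by rw [h]; rfl) (by decide)
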